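-- pv_equiv track=rewrite | github.com/key-moon/golf | base_code/task196.py | p
-- ===== SOURCE A (Python) =====
-- def p(g):
--  v=set();n=len(g);m=len(g[0])
--  for i in range(n):
--   for j in range(m):
--    if g[i][j] and (i,j) not in v:
--     c=[(i,j)];f=[(i,j)];v.add((i,j))
--     while f:
--      x,y=f.pop()
--      for dx,dy in (1,0),(0,1),(-1,0),(0,-1):
--       u,b=x+dx,y+dy
--       if 0<=u<n and 0<=b<m and g[u][b] and (u,b) not in v:
--        v.add((u,b));f+=[(u,b)];c+=[(u,b)]
--     a,b=zip(*c);W,H=max(a)-min(a)+1,max(b)-min(b)+1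
--     if W>1 and H>1 and len(c)==2*(W+H)-4:
--      for x,y in c:g[x][y]=3
--  return g
-- ===== SOURCE B (Python) =====
-- def p(g):
--     n = len(g); m = len(g[0])
--     seen = set()
--     comps = []
--     for i in range(n):
--         for j in range(m):
--             if g[i][j] and (i, j) not in seen:
--                 comp = {(i, j)}
--                 frontier = {(i, j)}
--                 while frontier:
--                     nxt = set()
--                     for (x, y) in frontier:
--                         for (u, w) in ((x + 1, y), (x, y + 1), (x - 1, y), (x, y - 1)):
--                             if 0 <= u < n and 0 <= w < m and g[u][w] and (u, w) not in comp and (u, w) not in seen: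
--                                 nxt.add((u, w))
--                     comp |= nxt
--                     frontier = nxt
--                 seen |= comp
--                 comps.append(comp)
--     for comp in comps:
--         xs = [x for (x, _) in comp]
--         ys = [y for (_, y) in comp]
--         W = max(xs) - min(xs) + 1
--         H = max(ys) - min(ys) + 1
--         if W > 1 and H > 1 and len(comp) == 2 * (W + H) - 4:
--             for (x, y) in comp:
--                 g[x][y] = 3
--     return g
-- ===== Notes on version B (the rewrite author's own statement) =====
-- stated objective: alternative
-- what changed: Replaces the single-pass per-seed stack-DFS flood fill (which marks the grid as it scans) by a two-phase algorithm: phase one collects every 4-connected component by level-synchronous frontier-set expansion (no stack, whole-frontier set operations per round), phase two applies the perimeter predicate and marks; only the return value is claimed, and Pre_ excludes the grids on which A raises IndexError (empty grid or a row shorter than the first).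
import Mathlib
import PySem

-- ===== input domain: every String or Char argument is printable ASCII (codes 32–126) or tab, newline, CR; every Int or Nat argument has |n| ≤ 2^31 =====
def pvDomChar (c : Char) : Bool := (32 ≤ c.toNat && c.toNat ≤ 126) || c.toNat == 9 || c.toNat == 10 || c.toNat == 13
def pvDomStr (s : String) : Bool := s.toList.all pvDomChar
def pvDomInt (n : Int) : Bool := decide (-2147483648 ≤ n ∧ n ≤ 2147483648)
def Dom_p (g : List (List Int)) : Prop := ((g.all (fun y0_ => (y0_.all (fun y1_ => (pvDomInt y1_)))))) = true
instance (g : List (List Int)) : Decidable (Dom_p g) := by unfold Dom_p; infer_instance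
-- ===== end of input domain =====

-- B replaces A's interleaved stack-DFS flood fill by a two-phase pass: level-synchronous
-- frontier-set expansion collects all components first, then a marking pass applies the
-- perimeter predicate; objective: alternative (same asymptotic cost). Both Pythons mutate
-- the argument grid; the equivalence proved here is about the return value.

-- g[i][j] and g[x][y]=3 (all indices in range under Pre_; pyGetD/pySetD are the total forms)
def pGet (g : List (List Int)) (i j : Int) : Int :=
  PySem.List.pyGetD (PySem.List.pyGetD g i []) j 0

def pSet3 (g : List (List Int)) (i j : Int) : List (List Int) :=
  PySem.List.pySetD g i (PySem.List.pySetD (PySem.List.pyGetD g i []) j 3)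

-- W>1 and H>1 and len(c)==2*(W+H)-4 (c is nonempty wherever this is called; getD 0 is a totality default)
def pRect (c : List (Int × Int)) : Bool :=
  let W := ((PySem.List.max? (c.map Prod.fst) (fun t => t)).getD 0) -
           ((PySem.List.min? (c.map Prod.fst) (fun t => t)).getD 0) + 1
  let H := ((PySem.List.max? (c.map Prod.snd) (fun t => t)).getD 0) -
           ((PySem.List.min? (c.map Prod.snd) (fun t => t)).getD 0) + 1
  decide (W > 1 ∧ H > 1 ∧ (c.length : Int) = 2 * (W + H) - 4)

-- for x,y in c: g[x][y] = 3
def pMark (g : List (List Int)) (c : List (Int × Int)) : List (List Int) :=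
  c.foldl (fun h t => pSet3 h t.1 t.2) g

-- ===== PORT A =====
-- DFS state (v, f, c); Python's stack f is kept top-first (f.pop() = head, f += [u] = cons)
def pNbrs (x y : Int) : List (Int × Int) := [(x+1,y),(x,y+1),(x-1,y),(x,y-1)]

def pVisit (g : List (List Int)) (n m : Int)
    (st : PySem.Set (Int × Int) × List (Int × Int) × List (Int × Int)) (d : Int × Int) :
    PySem.Set (Int × Int) × List (Int × Int) × List (Int × Int) :=
  if 0 ≤ d.1 ∧ d.1 < n ∧ 0 ≤ d.2 ∧ d.2 < m ∧ pGet g d.1 d.2 ≠ 0 ∧ d ∉ st.1 then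
    (PySem.Set.add st.1 d, d :: st.2.1, d :: st.2.2)
  else st

-- while f: x,y = f.pop(); for each neighbour ...  (fuel only makes the loop total; it is
-- proved sufficient below)
def pDfs (g : List (List Int)) (n m : Int) :
    Nat → PySem.Set (Int × Int) × List (Int × Int) × List (Int × Int) →
    PySem.Set (Int × Int) × List (Int × Int)
  | 0, st => (st.1, st.2.2)
  | fuel+1, st =>
    match st.2.1 with
    | [] => (st.1, st.2.2)
    | xy :: f' => pDfs g n m fuel ((pNbrs xy.1 xy.2).foldl (pVisit g n m) (st.1, f', st.2.2))

-- body of the scan over one cell (i,j)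
def pCell (n m : Int) (i : Int)
    (st : PySem.Set (Int × Int) × List (List Int)) (j : Int) :
    PySem.Set (Int × Int) × List (List Int) :=
  if pGet st.2 i j ≠ 0 ∧ (i, j) ∉ st.1 then
    let r := pDfs st.2 n m (2 * (n.toNat * m.toNat) + 2)
               (PySem.Set.add st.1 (i, j), [(i, j)], [(i, j)])
    (r.1, if pRect r.2 then pMark st.2 r.2 else st.2)
  else st

def p (g : List (List Int)) : List (List Int) :=
  let n : Int := g.length
  let m : Int := (PySem.List.pyGetD g 0 []).length
  ((PySem.List.pyRange 0 n 1).foldl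
    (fun st i => (PySem.List.pyRange 0 m 1).foldl (pCell n m i) st)
    ((PySem.Set.empty : PySem.Set (Int × Int)), g)).2

-- ===== PORT B =====
-- one round: the set of all fresh neighbours of the current frontier
def pbNext (g : List (List Int)) (n m : Int) (seen comp : PySem.Set (Int × Int))
    (frontier : List (Int × Int)) : PySem.Set (Int × Int) :=
  frontier.foldl (fun nxt xy =>
    [(xy.1+1,xy.2),(xy.1,xy.2+1),(xy.1-1,xy.2),(xy.1,xy.2-1)].foldl (fun nxt d =>
      if 0 ≤ d.1 ∧ d.1 < n ∧ 0 ≤ d.2 ∧ d.2 < m ∧ pGet g d.1 d.2 ≠ 0 ∧ d ∉ comp ∧ d ∉ seen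
      then PySem.Set.add nxt d else nxt) nxt) PySem.Set.empty

-- while frontier: nxt = ...; comp |= nxt; frontier = nxt  (fuel proved sufficient below)
def pbGrow (g : List (List Int)) (n m : Int) (seen : PySem.Set (Int × Int)) :
    Nat → PySem.Set (Int × Int) × List (Int × Int) → PySem.Set (Int × Int)
  | 0, st => st.1
  | fuel+1, st =>
    match st.2 with
    | [] => st.1
    | _ :: _ =>
      pbGrow g n m seen fuel
        (PySem.Set.update st.1 (pbNext g n m seen st.1 st.2), pbNext g n m seen st.1 st.2)

-- phase-1 body for one cell (i,j)
def pbCell (g : List (List Int)) (n m : Int) (i : Int)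
    (st : PySem.Set (Int × Int) × List (List (Int × Int))) (j : Int) :
    PySem.Set (Int × Int) × List (List (Int × Int)) :=
  if pGet g i j ≠ 0 ∧ (i, j) ∉ st.1 then
    let comp := pbGrow g n m st.1 (n.toNat * m.toNat + 2) ([(i, j)], [(i, j)])
    (PySem.Set.update st.1 comp, st.2 ++ [comp])
  else st

def pbComps (g : List (List Int)) (n m : Int) : List (List (Int × Int)) :=
  ((PySem.List.pyRange 0 n 1).foldl
    (fun st i => (PySem.List.pyRange 0 m 1).foldl (pbCell g n m i) st)
    ((PySem.Set.empty : PySem.Set (Int × Int)), [])).2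

def p_alt (g : List (List Int)) : List (List Int) :=
  let n : Int := g.length
  let m : Int := (PySem.List.pyGetD g 0 []).length
  (pbComps g n m).foldl (fun h comp => if pRect comp then pMark h comp else h) g

-- ===== PRECONDITION & SPEC =====
-- Pre_p excludes exactly the inputs on which Python A raises IndexError: the empty grid
-- (len(g[0])) and grids with a row shorter than the first row (g[i][j] for j < len(g[0])).
def Pre_p (g : List (List Int)) : Prop :=
  g ≠ [] ∧ ∀ row ∈ g, (g.headD []).length ≤ row.length

instance (g : List (List Int)) : Decidable (Pre_p g) := by unfold Pre_p; infer_instance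

def pvWitness_p : List (List Int) := [[1, 1], [1, 1]]

def Spec_p (g : List (List Int)) (out : List (List Int)) : Prop := out = p_alt g
instance (g : List (List Int)) (out : List (List Int)) : Decidable (Spec_p g out) := by unfold Spec_p; infer_instance

-- ===== CLAIM (what is proved, stated in full; the proofs are below) =====
def Claim_equal_p : Prop := ∀ (g : List (List Int)), Dom_p g → Pre_p g → Spec_p g (p g)

-- ===== LEMMAS AND PROOFS =====

def pValid (n m : Int) (d : Int × Int) : Prop := 0 ≤ d.1 ∧ d.1 < n ∧ 0 ≤ d.2 ∧ d.2 < m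

def pAdj (x d : Int × Int) : Prop := d ∈ pNbrs x.1 x.2

def pStep (g : List (List Int)) (n m : Int) (avoid : List (Int × Int)) (x d : Int × Int) : Prop :=
  pAdj x d ∧ pValid n m d ∧ pGet g d.1 d.2 ≠ 0 ∧ d ∉ avoid

def pReach (g : List (List Int)) (n m : Int) (avoid : List (Int × Int)) (s t : Int × Int) : Prop :=
  Relation.ReflTransGen (pStep g n m avoid) s t

theorem reach_subset_of_closed {g : List (List Int)} {n m : Int} {avoid S : List (Int × Int)}
    {s t : Int × Int} (hstart : s ∈ S)
    (hclosed : ∀ x ∈ S, ∀ d, pStep g n m avoid x d → d ∈ S)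
    (h : pReach g n m avoid s t) : t ∈ S := by
  induction h with
  | refl => exact hstart
  | tail _ hstep ih => exact hclosed _ ih _ hstep

theorem pReach_mono {g1 g2 : List (List Int)} {n m : Int} {a1 a2 : List (Int × Int)}
    {s t : Int × Int}
    (htr : ∀ d, pValid n m d → (pGet g1 d.1 d.2 ≠ 0 → pGet g2 d.1 d.2 ≠ 0))
    (hav : ∀ z : Int × Int, z ∈ a2 → z ∈ a1)
    (h : pReach g1 n m a1 s t) : pReach g2 n m a2 s t := by
  induction h with
  | refl => exact Relation.ReflTransGen.refl
  | tail _ hstep ih =>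
      exact Relation.ReflTransGen.tail ih
        ⟨hstep.1, hstep.2.1, htr _ hstep.2.1 hstep.2.2.1, fun hc => hstep.2.2.2 (hav _ hc)⟩

theorem pReach_congr {g1 g2 : List (List Int)} {n m : Int} {a1 a2 : List (Int × Int)}
    {s t : Int × Int}
    (htr : ∀ d, pValid n m d → (pGet g1 d.1 d.2 ≠ 0 ↔ pGet g2 d.1 d.2 ≠ 0))
    (hav : ∀ z : Int × Int, z ∈ a1 ↔ z ∈ a2) :
    pReach g1 n m a1 s t ↔ pReach g2 n m a2 s t := by
  constructor
  · exact pReach_mono (fun d hd => (htr d hd).mp) (fun z hz => (hav z).mpr hz)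
  · exact pReach_mono (fun d hd => (htr d hd).mpr) (fun z hz => (hav z).mp hz)

theorem len_le_cells {n m : Int} : ∀ (c : List (Int × Int)), c.Nodup →
    (∀ z ∈ c, pValid n m z) → c.length ≤ n.toNat * m.toNat := by
  intro c hnd hval
  have hsub : c.toFinset ⊆ (Finset.Ico 0 n) ×ˢ (Finset.Ico 0 m) := by
    intro z hz
    have hv := hval z (List.mem_toFinset.mp hz)
    simp only [Finset.mem_product, Finset.mem_Ico]
    exact ⟨⟨hv.1, hv.2.1⟩, ⟨hv.2.2.1, hv.2.2.2⟩⟩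
  have h1 : c.toFinset.card = c.length := List.toFinset_card_of_nodup hnd
  have h2 := Finset.card_le_card hsub
  rw [h1] at h2
  simpa using h2

-- ---- A side: the DFS loop ----

structure DfsInv (g : List (List Int)) (n m : Int) (avoid : List (Int × Int)) (s : Int × Int)
    (v f c : List (Int × Int)) : Prop where
  vmem : ∀ z, z ∈ v ↔ z ∈ avoid ∨ z ∈ c
  cnodup : c.Nodup
  cav : ∀ z ∈ c, z ∉ avoid
  cval : ∀ z ∈ c, pValid n m z
  ctru : ∀ z ∈ c, pGet g z.1 z.2 ≠ 0
  fsub : ∀ z ∈ f, z ∈ c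
  crch : ∀ z ∈ c, pReach g n m avoid s z
  smem : s ∈ c
  closed : ∀ z ∈ c, z ∉ f → ∀ e, pAdj z e → pValid n m e → pGet g e.1 e.2 ≠ 0 → e ∈ v

structure MidInv (g : List (List Int)) (n m : Int) (avoid : List (Int × Int)) (s x : Int × Int)
    (L : List (Int × Int)) (v f c : List (Int × Int)) : Prop where
  vmem : ∀ z, z ∈ v ↔ z ∈ avoid ∨ z ∈ c
  cnodup : c.Nodup
  cav : ∀ z ∈ c, z ∉ avoid
  cval : ∀ z ∈ c, pValid n m z
  ctru : ∀ z ∈ c, pGet g z.1 z.2 ≠ 0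
  fsub : ∀ z ∈ f, z ∈ c
  crch : ∀ z ∈ c, pReach g n m avoid s z
  smem : s ∈ c
  closed : ∀ z ∈ c, z ∉ f → ∀ e, pAdj z e → pValid n m e → pGet g e.1 e.2 ≠ 0 →
    (e ∈ v ∨ (z = x ∧ e ∈ L))

theorem visit_fold {g : List (List Int)} {n m : Int} {avoid : List (Int × Int)} {s x : Int × Int}
    (hx : pReach g n m avoid s x) :
    ∀ (L : List (Int × Int)) (v f c : List (Int × Int)), (∀ d ∈ L, pAdj x d) →
      MidInv g n m avoid s x L v f c →
      ∃ k,
        MidInv g n m avoid s x []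
          (L.foldl (pVisit g n m) (v, f, c)).1
          (L.foldl (pVisit g n m) (v, f, c)).2.1
          (L.foldl (pVisit g n m) (v, f, c)).2.2
        ∧ (L.foldl (pVisit g n m) (v, f, c)).2.2.length = c.length + k
        ∧ (L.foldl (pVisit g n m) (v, f, c)).2.1.length = f.length + k := by
  intro L
  induction L with
  | nil =>
      intro v f c _ hI
      exact ⟨0, by simpa using hI, by simp, by simp⟩
  | cons d L' ih =>
      intro v f c hL hI
      have hAdj : pAdj x d := hL d (List.mem_cons_self ..)
      simp only [List.foldl_cons]
      by_cases hcond : 0 ≤ d.1 ∧ d.1 < n ∧ 0 ≤ d.2 ∧ d.2 < m ∧ pGet g d.1 d.2 ≠ 0 ∧ d ∉ v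
      · -- d is added
        have hstep : pVisit g n m (v, f, c) d = (PySem.Set.add v d, d :: f, d :: c) := by
          simp only [pVisit]; rw [if_pos hcond]
        rw [hstep]
        have hdval : pValid n m d := ⟨hcond.1, hcond.2.1, hcond.2.2.1, hcond.2.2.2.1⟩
        have hdtru : pGet g d.1 d.2 ≠ 0 := hcond.2.2.2.2.1
        have hdnv : d ∉ v := hcond.2.2.2.2.2
        have hdnc : d ∉ c := fun hc => hdnv ((hI.vmem d).mpr (Or.inr hc))
        have hdna : d ∉ avoid := fun ha => hdnv ((hI.vmem d).mpr (Or.inl ha))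
        have hdr : pReach g n m avoid s d :=
          Relation.ReflTransGen.tail hx ⟨hAdj, hdval, hdtru, hdna⟩
        have hI' : MidInv g n m avoid s x L' (PySem.Set.add v d) (d :: f) (d :: c) := by
          refine ⟨?_, ?_, ?_, ?_, ?_, ?_, ?_, ?_, ?_⟩
          · intro z
            rw [PySem.Set.mem_add, hI.vmem z]
            simp only [List.mem_cons]
            tauto
          · exact List.nodup_cons.mpr ⟨hdnc, hI.cnodup⟩
          · intro z hz
            rcases List.mem_cons.mp hz with h | h
            · subst h; exact hdna
            · exact hI.cav z h
          · intro z hz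
            rcases List.mem_cons.mp hz with h | h
            · subst h; exact hdval
            · exact hI.cval z h
          · intro z hz
            rcases List.mem_cons.mp hz with h | h
            · subst h; exact hdtru
            · exact hI.ctru z h
          · intro z hz
            rcases List.mem_cons.mp hz with h | h
            · subst h; exact List.mem_cons_self ..
            · exact List.mem_cons_of_mem _ (hI.fsub z h)
          · intro z hz
            rcases List.mem_cons.mp hz with h | h
            · subst h; exact hdr
            · exact hI.crch z h
          · exact List.mem_cons_of_mem _ hI.smem
          · intro z hz hzf e hae hve hte
            have hzc : z ∈ c := by
              rcases List.mem_cons.mp hz with h | h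
              · exact absurd (h ▸ List.mem_cons_self ..) hzf
              · exact h
            have hznf : z ∉ f := fun hf => hzf (List.mem_cons_of_mem _ hf)
            rcases hI.closed z hzc hznf e hae hve hte with h | ⟨hzx, hel⟩
            · exact Or.inl (by rw [PySem.Set.mem_add]; exact Or.inl h)
            · rcases List.mem_cons.mp hel with h | h
              · subst h; exact Or.inl (by rw [PySem.Set.mem_add]; exact Or.inr rfl)
              · exact Or.inr ⟨hzx, h⟩
        obtain ⟨k, hmid, hlc, hlf⟩ := ih _ _ _ (fun e he => hL e (List.mem_cons_of_mem _ he)) hI'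
        exact ⟨k + 1, hmid, by simp at hlc ⊢; omega, by simp at hlf ⊢; omega⟩
      · -- d is not added
        have hstep : pVisit g n m (v, f, c) d = (v, f, c) := by
          simp only [pVisit]; rw [if_neg hcond]
        rw [hstep]
        have hI' : MidInv g n m avoid s x L' v f c := by
          refine ⟨hI.vmem, hI.cnodup, hI.cav, hI.cval, hI.ctru, hI.fsub, hI.crch, hI.smem, ?_⟩
          intro z hz hzf e hae hve hte
          rcases hI.closed z hz hzf e hae hve hte with h | ⟨hzx, hel⟩
          · exact Or.inl h
          · rcases List.mem_cons.mp hel with h | h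
            · subst h
              -- the condition failed but e is valid and truthy, so e ∈ v
              by_cases hev : e ∈ v
              · exact Or.inl hev
              · exact absurd ⟨hve.1, hve.2.1, hve.2.2.1, hve.2.2.2, hte, hev⟩ hcond
            · exact Or.inr ⟨hzx, h⟩
        exact ih _ _ _ (fun e he => hL e (List.mem_cons_of_mem _ he)) hI'

theorem pDfs_succ_cons {g : List (List Int)} {n m : Int} {fuel : Nat}
    {v f c : List (Int × Int)} {xy : Int × Int} :
    pDfs g n m (fuel+1) (v, xy :: f, c) =
      pDfs g n m fuel ((pNbrs xy.1 xy.2).foldl (pVisit g n m) (v, f, c)) := rfl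

theorem pDfs_spec {g : List (List Int)} {n m : Int} {avoid : List (Int × Int)} {s : Int × Int} :
    ∀ (fuel : Nat) (v f c : List (Int × Int)),
    DfsInv g n m avoid s v f c →
    2 * (n.toNat * m.toNat - c.length) + f.length < fuel →
    (∀ z, z ∈ (pDfs g n m fuel (v, f, c)).1 ↔ z ∈ avoid ∨ z ∈ (pDfs g n m fuel (v, f, c)).2) ∧
    (pDfs g n m fuel (v, f, c)).2.Nodup ∧
    (∀ z, z ∈ (pDfs g n m fuel (v, f, c)).2 ↔ pReach g n m avoid s z) ∧
    (∀ z ∈ (pDfs g n m fuel (v, f, c)).2,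
      pValid n m z ∧ pGet g z.1 z.2 ≠ 0 ∧ z ∉ avoid) := by
  intro fuel
  induction fuel with
  | zero => intro v f c _ hlt; omega
  | succ fuel ih =>
      intro v f c hI hlt
      match f with
      | [] =>
          have hres : pDfs g n m (fuel+1) (v, [], c) = (v, c) := rfl
          rw [hres]
          refine ⟨hI.vmem, hI.cnodup, ?_, fun z hz => ⟨hI.cval z hz, hI.ctru z hz, hI.cav z hz⟩⟩
          intro z
          constructor
          · exact hI.crch z
          · intro hr
            refine reach_subset_of_closed hI.smem ?_ hr
            intro a ha e he
            have := hI.closed a ha (by simp) e he.1 he.2.1 he.2.2.1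
            rcases (hI.vmem e).mp this with h | h
            · exact absurd h he.2.2.2
            · exact h
      | xy :: f' =>
          rw [pDfs_succ_cons]
          have hxyc : xy ∈ c := hI.fsub xy (List.mem_cons_self ..)
          have hx : pReach g n m avoid s xy := hI.crch xy hxyc
          have hmid : MidInv g n m avoid s xy (pNbrs xy.1 xy.2) v f' c := by
            refine ⟨hI.vmem, hI.cnodup, hI.cav, hI.cval, hI.ctru,
              (fun z hz => hI.fsub z (List.mem_cons_of_mem _ hz)), hI.crch, hI.smem, ?_⟩
            intro z hz hzf e hae hve hte
            by_cases hzx : z = xy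
            · exact Or.inr ⟨hzx, hzx ▸ hae⟩
            · refine Or.inl (hI.closed z hz ?_ e hae hve hte)
              intro hzm
              rcases List.mem_cons.mp hzm with h | h
              · exact hzx h
              · exact hzf h
          obtain ⟨k, hmid', hlc, hlf⟩ :=
            visit_fold hx (pNbrs xy.1 xy.2) v f' c (fun d hd => hd) hmid
          set st' := (pNbrs xy.1 xy.2).foldl (pVisit g n m) (v, f', c) with hst'
          have hI' : DfsInv g n m avoid s st'.1 st'.2.1 st'.2.2 := by
            refine ⟨hmid'.vmem, hmid'.cnodup, hmid'.cav, hmid'.cval, hmid'.ctru,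
              hmid'.fsub, hmid'.crch, hmid'.smem, ?_⟩
            intro z hz hzf e hae hve hte
            rcases hmid'.closed z hz hzf e hae hve hte with h | ⟨_, h⟩
            · exact h
            · exact absurd h (List.not_mem_nil)
          have hcard : st'.2.2.length ≤ n.toNat * m.toNat :=
            len_le_cells _ hmid'.cnodup hmid'.cval
          have hlt' : 2 * (n.toNat * m.toNat - st'.2.2.length) + st'.2.1.length < fuel := by
            simp only [List.length_cons] at hlt
            omega
          have := ih st'.1 st'.2.1 st'.2.2 hI' hlt'
          simpa using this

-- ---- B side: frontier growth ----

structure GrowInv (g : List (List Int)) (n m : Int) (seen : List (Int × Int)) (s : Int × Int)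
    (comp frontier : List (Int × Int)) : Prop where
  cnodup : comp.Nodup
  cseen : ∀ z ∈ comp, z ∉ seen
  cval : ∀ z ∈ comp, pValid n m z
  ctru : ∀ z ∈ comp, pGet g z.1 z.2 ≠ 0
  fsub : ∀ z ∈ frontier, z ∈ comp
  crch : ∀ z ∈ comp, pReach g n m seen s z
  smem : s ∈ comp
  closed : ∀ z ∈ comp, z ∉ frontier → ∀ e, pAdj z e → pValid n m e → pGet g e.1 e.2 ≠ 0 →
    e ∈ seen ∨ e ∈ comp

theorem mem_if_add {s : PySem.Set (Int × Int)} {d z : Int × Int} {P : Prop} [Decidable P] :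
    z ∈ (if P then PySem.Set.add s d else s) ↔ z ∈ s ∨ (P ∧ z = d) := by
  split_ifs with h
  · rw [PySem.Set.mem_add]; tauto
  · tauto

theorem nodup_if_add {s : PySem.Set (Int × Int)} {d : Int × Int} {P : Prop} [Decidable P]
    (hs : s.Nodup) : (if P then PySem.Set.add s d else s).Nodup := by
  split_ifs
  · exact PySem.Set.nodup_add _ _ hs
  · exact hs

theorem pbNext_inner_mem {g : List (List Int)} {n m : Int} {seen comp : PySem.Set (Int × Int)}
    {xy : Int × Int} {nxt : PySem.Set (Int × Int)} {z : Int × Int} :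
    z ∈ ([(xy.1+1,xy.2),(xy.1,xy.2+1),(xy.1-1,xy.2),(xy.1,xy.2-1)].foldl (fun nxt d =>
      if 0 ≤ d.1 ∧ d.1 < n ∧ 0 ≤ d.2 ∧ d.2 < m ∧ pGet g d.1 d.2 ≠ 0 ∧ d ∉ comp ∧ d ∉ seen
      then PySem.Set.add nxt d else nxt) nxt) ↔
    z ∈ nxt ∨ (pAdj xy z ∧ pValid n m z ∧ pGet g z.1 z.2 ≠ 0 ∧ z ∉ comp ∧ z ∉ seen) := by
  simp only [List.foldl_cons, List.foldl_nil]
  rw [mem_if_add, mem_if_add, mem_if_add, mem_if_add]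
  constructor
  · rintro ((((h | ⟨hc, rfl⟩) | ⟨hc, rfl⟩) | ⟨hc, rfl⟩) | ⟨hc, rfl⟩)
    · exact Or.inl h
    all_goals
      exact Or.inr ⟨by simp [pAdj, pNbrs], ⟨hc.1, hc.2.1, hc.2.2.1, hc.2.2.2.1⟩,
        hc.2.2.2.2.1, hc.2.2.2.2.2.1, hc.2.2.2.2.2.2⟩
  · rintro (h | ⟨hadj, hval, htru, hnc, hns⟩)
    · exact Or.inl (Or.inl (Or.inl (Or.inl h)))
    · simp only [pAdj, pNbrs, List.mem_cons, List.not_mem_nil, or_false] at hadj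
      rcases hadj with rfl | rfl | rfl | rfl
      · exact Or.inl (Or.inl (Or.inl (Or.inr
          ⟨⟨hval.1, hval.2.1, hval.2.2.1, hval.2.2.2, htru, hnc, hns⟩, rfl⟩)))
      · exact Or.inl (Or.inl (Or.inr
          ⟨⟨hval.1, hval.2.1, hval.2.2.1, hval.2.2.2, htru, hnc, hns⟩, rfl⟩))
      · exact Or.inl (Or.inr
          ⟨⟨hval.1, hval.2.1, hval.2.2.1, hval.2.2.2, htru, hnc, hns⟩, rfl⟩)
      · exact Or.inr
          ⟨⟨hval.1, hval.2.1, hval.2.2.1, hval.2.2.2, htru, hnc, hns⟩, rfl⟩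

theorem pbNext_mem {g : List (List Int)} {n m : Int} {seen comp : PySem.Set (Int × Int)} :
    ∀ (frontier : List (Int × Int)) (nxt : PySem.Set (Int × Int)) (z : Int × Int),
    (z ∈ frontier.foldl (fun nxt xy =>
      [(xy.1+1,xy.2),(xy.1,xy.2+1),(xy.1-1,xy.2),(xy.1,xy.2-1)].foldl (fun nxt d =>
        if 0 ≤ d.1 ∧ d.1 < n ∧ 0 ≤ d.2 ∧ d.2 < m ∧ pGet g d.1 d.2 ≠ 0 ∧ d ∉ comp ∧ d ∉ seen
        then PySem.Set.add nxt d else nxt) nxt) nxt ↔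
    z ∈ nxt ∨ ∃ x ∈ frontier, pAdj x z ∧ pValid n m z ∧ pGet g z.1 z.2 ≠ 0 ∧ z ∉ comp ∧ z ∉ seen) := by
  intro frontier
  induction frontier with
  | nil => intro nxt z; simp
  | cons xy fr ih =>
      intro nxt z
      rw [List.foldl_cons, ih, pbNext_inner_mem]
      simp only [List.mem_cons]
      constructor
      · rintro ((h | h) | ⟨x, hx, hprop⟩)
        · exact Or.inl h
        · exact Or.inr ⟨xy, Or.inl rfl, h⟩
        · exact Or.inr ⟨x, Or.inr hx, hprop⟩
      · rintro (h | ⟨x, (hx | hx), hprop⟩)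
        · exact Or.inl (Or.inl h)
        · exact Or.inl (Or.inr (hx ▸ hprop))
        · exact Or.inr ⟨x, hx, hprop⟩

theorem pbNext_nodup {g : List (List Int)} {n m : Int} {seen comp : PySem.Set (Int × Int)} :
    ∀ (frontier : List (Int × Int)) (nxt : PySem.Set (Int × Int)), nxt.Nodup →
    (frontier.foldl (fun nxt xy =>
      [(xy.1+1,xy.2),(xy.1,xy.2+1),(xy.1-1,xy.2),(xy.1,xy.2-1)].foldl (fun nxt d =>
        if 0 ≤ d.1 ∧ d.1 < n ∧ 0 ≤ d.2 ∧ d.2 < m ∧ pGet g d.1 d.2 ≠ 0 ∧ d ∉ comp ∧ d ∉ seen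
        then PySem.Set.add nxt d else nxt) nxt) nxt).Nodup := by
  intro frontier
  induction frontier with
  | nil => intro nxt h; simpa using h
  | cons xy fr ih =>
      intro nxt h
      rw [List.foldl_cons]
      apply ih
      simp only [List.foldl_cons, List.foldl_nil]
      exact nodup_if_add (nodup_if_add (nodup_if_add (nodup_if_add h)))

theorem pbNext_mem' {g : List (List Int)} {n m : Int} {seen comp : PySem.Set (Int × Int)}
    {frontier : List (Int × Int)} {z : Int × Int} :
    z ∈ pbNext g n m seen comp frontier ↔
    ∃ x ∈ frontier, pAdj x z ∧ pValid n m z ∧ pGet g z.1 z.2 ≠ 0 ∧ z ∉ comp ∧ z ∉ seen := by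
  unfold pbNext
  rw [pbNext_mem frontier PySem.Set.empty z]
  simp [PySem.Set.empty]

theorem pbGrow_nil {g : List (List Int)} {n m : Int} {seen : PySem.Set (Int × Int)}
    {comp : PySem.Set (Int × Int)} : ∀ fuel, pbGrow g n m seen fuel (comp, []) = comp := by
  intro fuel; cases fuel <;> rfl

theorem grow_final {g : List (List Int)} {n m : Int} {seen : List (Int × Int)} {s : Int × Int}
    {comp : List (Int × Int)} (hI : GrowInv g n m seen s comp []) :
    comp.Nodup ∧ (∀ z, z ∈ comp ↔ pReach g n m seen s z) ∧
    (∀ z ∈ comp, pValid n m z ∧ pGet g z.1 z.2 ≠ 0 ∧ z ∉ seen) := by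
  refine ⟨hI.cnodup, ?_, fun z hz => ⟨hI.cval z hz, hI.ctru z hz, hI.cseen z hz⟩⟩
  intro z
  constructor
  · exact hI.crch z
  · intro hr
    refine reach_subset_of_closed hI.smem ?_ hr
    intro a ha e he
    rcases hI.closed a ha (by simp) e he.1 he.2.1 he.2.2.1 with h | h
    · exact absurd h he.2.2.2
    · exact h

theorem pbGrow_spec {g : List (List Int)} {n m : Int} {seen : List (Int × Int)} {s : Int × Int} :
    ∀ (fuel : Nat) (comp frontier : List (Int × Int)),
    GrowInv g n m seen s comp frontier →
    n.toNat * m.toNat + 2 ≤ fuel + comp.length →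
    (pbGrow g n m seen fuel (comp, frontier)).Nodup ∧
    (∀ z, z ∈ pbGrow g n m seen fuel (comp, frontier) ↔ pReach g n m seen s z) ∧
    (∀ z ∈ pbGrow g n m seen fuel (comp, frontier),
      pValid n m z ∧ pGet g z.1 z.2 ≠ 0 ∧ z ∉ seen) := by
  intro fuel
  induction fuel with
  | zero =>
      intro comp frontier hI hf
      have := len_le_cells comp hI.cnodup hI.cval
      omega
  | succ fuel ih =>
      intro comp frontier hI hf
      match frontier with
      | [] => rw [pbGrow_nil]; exact grow_final hI
      | xy :: fr =>
          have hstep : pbGrow g n m seen (fuel+1) (comp, xy :: fr) =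
              pbGrow g n m seen fuel
                (PySem.Set.update comp (pbNext g n m seen comp (xy :: fr)),
                 pbNext g n m seen comp (xy :: fr)) := rfl
          rw [hstep]
          set nxt := pbNext g n m seen comp (xy :: fr) with hnxt
          have hnmem : ∀ z, z ∈ nxt ↔
              ∃ x ∈ (xy :: fr), pAdj x z ∧ pValid n m z ∧ pGet g z.1 z.2 ≠ 0 ∧
                z ∉ comp ∧ z ∉ seen := fun z => pbNext_mem'
          have hnnd : nxt.Nodup := pbNext_nodup _ _ (by simp [PySem.Set.empty])
          have hdisj : ∀ z ∈ nxt, z ∉ comp := by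
            intro z hz
            obtain ⟨x, hx, h1, h2, h3, h4, h5⟩ := (hnmem z).mp hz
            exact h4
          have hupd : PySem.Set.update comp nxt = comp ++ nxt :=
            PySem.Set.update_eq_append_of_disjoint _ _ hnnd hdisj
          have hI' : GrowInv g n m seen s (PySem.Set.update comp nxt) nxt := by
            rw [hupd]
            refine ⟨?_, ?_, ?_, ?_, ?_, ?_, ?_, ?_⟩
            · exact List.Nodup.append hI.cnodup hnnd (fun a ha hb => hdisj a hb ha)
            · intro z hz
              rcases List.mem_append.mp hz with h | h
              · exact hI.cseen z h
              · obtain ⟨x, hx, h1, h2, h3, h4, h5⟩ := (hnmem z).mp h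
                exact h5
            · intro z hz
              rcases List.mem_append.mp hz with h | h
              · exact hI.cval z h
              · obtain ⟨x, hx, h1, h2, h3, h4, h5⟩ := (hnmem z).mp h
                exact h2
            · intro z hz
              rcases List.mem_append.mp hz with h | h
              · exact hI.ctru z h
              · obtain ⟨x, hx, h1, h2, h3, h4, h5⟩ := (hnmem z).mp h
                exact h3
            · intro z hz; exact List.mem_append.mpr (Or.inr hz)
            · intro z hz
              rcases List.mem_append.mp hz with h | h
              · exact hI.crch z h
              · obtain ⟨x, hx, hadj, hval, htru, _, hns⟩ := (hnmem z).mp h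
                exact Relation.ReflTransGen.tail (hI.crch x (hI.fsub x hx))
                  ⟨hadj, hval, htru, hns⟩
            · exact List.mem_append.mpr (Or.inl hI.smem)
            · intro z hz hznf e hae hve hte
              rcases List.mem_append.mp hz with h | h
              · by_cases hzf : z ∈ xy :: fr
                · by_cases hes : e ∈ seen
                  · exact Or.inl hes
                  · by_cases hec : e ∈ comp
                    · exact Or.inr (List.mem_append.mpr (Or.inl hec))
                    · refine Or.inr (List.mem_append.mpr (Or.inr ?_))
                      exact (hnmem e).mpr ⟨z, hzf, hae, hve, hte, hec, hes⟩
                · rcases hI.closed z h hzf e hae hve hte with h' | h'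
                  · exact Or.inl h'
                  · exact Or.inr (List.mem_append.mpr (Or.inl h'))
              · exact absurd h hznf
          by_cases hne : nxt = []
          · rw [hne] at hI' ⊢
            rw [pbGrow_nil]
            have : PySem.Set.update comp ([] : List (Int × Int)) = comp := by
              simp
            rw [this] at hI' ⊢
            exact grow_final hI'
          · have hlen : (PySem.Set.update comp nxt).length = comp.length + nxt.length := by
              rw [hupd, List.length_append]
            have hpos : 0 < nxt.length := List.length_pos_iff.mpr hne
            exact ih _ _ hI' (by omega)

-- ---- marking and grids ----

theorem pyGetD_toNat {α : Type} (h : List α) (d : α) {x : Int} (hx : 0 ≤ x) :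
    PySem.List.pyGetD h x d = h.getD x.toNat d := by
  obtain ⟨k, rfl⟩ := Int.eq_ofNat_of_zero_le hx
  rw [PySem.List.pyGetD_natCast]
  simp

theorem pyGetD_eq_getElem' {α : Type} (h : List α) (d : α) {x : Int} (hx : 0 ≤ x)
    (hxr : x.toNat < h.length) : PySem.List.pyGetD h x d = h[x.toNat] := by
  rw [pyGetD_toNat h d hx, List.getD_eq_getElem _ _ hxr]

theorem pGet_nonneg_eq {h : List (List Int)} {i j : Int} (hi : 0 ≤ i) (hj : 0 ≤ j) :
    pGet h i j = ((h.getD i.toNat []).getD j.toNat 0) := by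
  unfold pGet
  rw [pyGetD_toNat _ _ hi, pyGetD_toNat _ _ hj]

theorem rowLens_pSet3 {h : List (List Int)} {x y : Int} (hx : 0 ≤ x) :
    (pSet3 h x y).map List.length = h.map List.length := by
  unfold pSet3
  rw [PySem.List.pySetD_of_nonneg _ _ hx]
  apply List.ext_getElem (by simp)
  intro u hu1 hu2
  simp only [List.getElem_map] at *
  rw [List.getElem_set]
  split_ifs with hux
  · subst hux
    rw [PySem.List.length_pySetD]
    congr 1
    exact pyGetD_eq_getElem' h [] hx (by simpa using hu2)
  · rfl

theorem pGet_pSet3 {h : List (List Int)} {x y i j : Int} (hx : 0 ≤ x) (hy : 0 ≤ y)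
    (hi : 0 ≤ i) (hj : 0 ≤ j) (hxr : x.toNat < h.length)
    (hyr : y.toNat < (PySem.List.pyGetD h x []).length) :
    pGet (pSet3 h x y) i j = if i = x ∧ j = y then 3 else pGet h i j := by
  have hrow : PySem.List.pyGetD h x [] = h[x.toNat] :=
    pyGetD_eq_getElem' h [] hx hxr
  unfold pSet3
  rw [PySem.List.pySetD_of_nonneg _ _ hx, PySem.List.pySetD_of_nonneg _ _ hy]
  rw [pGet_nonneg_eq hi hj, pGet_nonneg_eq hi hj]
  by_cases hix : i = x
  · subst hix
    have houter : (h.set i.toNat ((PySem.List.pyGetD h i []).set y.toNat 3)).getD i.toNat [] =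
        (PySem.List.pyGetD h i []).set y.toNat 3 := by
      rw [List.getD_eq_getElem _ _ (by rw [List.length_set]; exact hxr), List.getElem_set_self]
    rw [houter]
    have hrget : h.getD i.toNat [] = PySem.List.pyGetD h i [] := by
      rw [List.getD_eq_getElem _ _ hxr]; exact hrow.symm
    rw [hrget]
    by_cases hjy : j = y
    · subst hjy
      rw [if_pos ⟨rfl, rfl⟩]
      rw [List.getD_eq_getElem _ _ (by rw [List.length_set]; exact hyr), List.getElem_set_self]
    · rw [if_neg (fun hc => hjy hc.2)]
      by_cases hjr : j.toNat < (PySem.List.pyGetD h i []).length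
      · rw [List.getD_eq_getElem _ _ (by rw [List.length_set]; exact hjr),
          List.getD_eq_getElem _ _ hjr, List.getElem_set_ne (by omega)]
      · rw [List.getD_eq_default _ _ (by rw [List.length_set]; omega),
          List.getD_eq_default _ _ (by omega)]
  · rw [if_neg (fun hc => hix hc.1)]
    have houter : (h.set x.toNat ((PySem.List.pyGetD h x []).set y.toNat 3)).getD i.toNat [] =
        h.getD i.toNat [] := by
      by_cases hir : i.toNat < h.length
      · rw [List.getD_eq_getElem _ _ (by rw [List.length_set]; exact hir),
          List.getD_eq_getElem _ _ hir, List.getElem_set_ne (by omega)]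
      · rw [List.getD_eq_default _ _ (by rw [List.length_set]; omega),
          List.getD_eq_default _ _ (by omega)]
    rw [houter]

theorem rowlen_of_mapLen {h g0 : List (List Int)} {i : Int}
    (hmap : h.map List.length = g0.map List.length) (hi : 0 ≤ i) (hir : i.toNat < g0.length) :
    (PySem.List.pyGetD h i []).length = (PySem.List.pyGetD g0 i []).length := by
  have hlen : h.length = g0.length := by
    have := congrArg List.length hmap; simpa using this
  have h1 : (h.map List.length).getD i.toNat 0 = (g0.map List.length).getD i.toNat 0 := by
    rw [hmap]
  rw [List.getD_eq_getElem _ _ (by simpa using (show i.toNat < h.length by omega)),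
    List.getD_eq_getElem _ _ (by simpa using hir)] at h1
  simp only [List.getElem_map] at h1
  rw [pyGetD_eq_getElem' h [] hi (by omega), pyGetD_eq_getElem' g0 [] hi hir]
  exact h1

theorem pMark_facts : ∀ (c : List (Int × Int)) (h : List (List Int)),
    (∀ t ∈ c, 0 ≤ t.1 ∧ t.1.toNat < h.length ∧ 0 ≤ t.2 ∧
      t.2.toNat < (PySem.List.pyGetD h t.1 []).length) →
    ((pMark h c).map List.length = h.map List.length ∧
     ∀ i j : Int, 0 ≤ i → 0 ≤ j →
       pGet (pMark h c) i j = if (i, j) ∈ c then 3 else pGet h i j) := by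
  intro c
  induction c with
  | nil => intro h _; exact ⟨rfl, by simp [pMark]⟩
  | cons t c' ih =>
      intro h hc
      have ht := hc t (List.mem_cons_self ..)
      have hstep : pMark h (t :: c') = pMark (pSet3 h t.1 t.2) c' := rfl
      have hrl : (pSet3 h t.1 t.2).map List.length = h.map List.length :=
        rowLens_pSet3 ht.1
      have hlen : (pSet3 h t.1 t.2).length = h.length := by
        have := congrArg List.length hrl; simpa using this
      have hc' : ∀ t' ∈ c', 0 ≤ t'.1 ∧ t'.1.toNat < (pSet3 h t.1 t.2).length ∧ 0 ≤ t'.2 ∧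
          t'.2.toNat < (PySem.List.pyGetD (pSet3 h t.1 t.2) t'.1 []).length := by
        intro t' ht'
        have h4 := hc t' (List.mem_cons_of_mem _ ht')
        refine ⟨h4.1, by omega, h4.2.2.1, ?_⟩
        rw [rowlen_of_mapLen hrl h4.1 h4.2.1]
        exact h4.2.2.2
      obtain ⟨ihrl, ihget⟩ := ih (pSet3 h t.1 t.2) hc'
      constructor
      · rw [hstep, ihrl, hrl]
      · intro i j hi hj
        rw [hstep, ihget i j hi hj,
          pGet_pSet3 ht.1 ht.2.2.1 hi hj ht.2.1 ht.2.2.2]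
        simp only [List.mem_cons]
        by_cases h1 : (i, j) ∈ c'
        · rw [if_pos h1, if_pos (Or.inr h1)]
        · rw [if_neg h1]
          by_cases h2 : (i, j) = t
          · have : i = t.1 ∧ j = t.2 := ⟨congrArg Prod.fst h2, congrArg Prod.snd h2⟩
            rw [if_pos this, if_pos (Or.inl h2)]
          · have : ¬(i = t.1 ∧ j = t.2) := by
              intro hc2
              exact h2 (Prod.ext hc2.1 hc2.2)
            rw [if_neg this, if_neg (by tauto)]

theorem pGet_eq_getElem {h : List (List Int)} {k l : Nat} (hk : k < h.length)
    (hl : l < (h[k]).length) : pGet h (k : Int) (l : Int) = h[k][l] := by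
  unfold pGet
  rw [PySem.List.pyGetD_natCast, PySem.List.pyGetD_natCast,
    List.getD_eq_getElem _ _ hk, List.getD_eq_getElem _ _ hl]

theorem grid_ext {h1 h2 : List (List Int)}
    (hs : h1.map List.length = h2.map List.length)
    (hp : ∀ i j : Int, 0 ≤ i → 0 ≤ j → pGet h1 i j = pGet h2 i j) : h1 = h2 := by
  have hlen : h1.length = h2.length := by
    have := congrArg List.length hs; simpa using this
  apply List.ext_getElem hlen
  intro k hk1 hk2
  have hrow : (h1[k]).length = (h2[k]).length := by
    have := congrArg (fun l => l.getD k 0) hs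
    simpa [List.getD_eq_getElem, hk1, hk2] using this
  apply List.ext_getElem hrow
  intro l hl1 hl2
  have := hp (k : Int) (l : Int) (by positivity) (by positivity)
  rw [pGet_eq_getElem hk1 hl1, pGet_eq_getElem hk2 hl2] at this
  exact this

-- ---- the perimeter predicate is determined by the member set ----

theorem max?_id_eq_of_mem_iff {xs ys : List Int} (hne : xs ≠ [])
    (h : ∀ z, z ∈ xs ↔ z ∈ ys) :
    PySem.List.max? xs (fun t => t) = PySem.List.max? ys (fun t => t) := by
  have hne' : ys ≠ [] := by
    obtain ⟨a, ha⟩ := List.exists_mem_of_ne_nil xs hne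
    intro hy
    exact absurd ((h a).mp ha) (by simp [hy])
  obtain ⟨m1, hm1⟩ := Option.ne_none_iff_exists'.mp
    (show PySem.List.max? xs (fun t => t) ≠ none from
      fun hc => hne ((PySem.List.max?_eq_none_iff _ _).mp hc))
  obtain ⟨m2, hm2⟩ := Option.ne_none_iff_exists'.mp
    (show PySem.List.max? ys (fun t => t) ≠ none from
      fun hc => hne' ((PySem.List.max?_eq_none_iff _ _).mp hc))
  rw [hm1, hm2]
  have h1 := PySem.List.max?_mem hm1
  have h2 := PySem.List.max?_mem hm2
  have h12 := PySem.List.max?_isMax hm2 m1 ((h m1).mp h1)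
  have h21 := PySem.List.max?_isMax hm1 m2 ((h m2).mpr h2)
  simp only at h12 h21
  exact congrArg some (le_antisymm h12 h21)

theorem min?_id_eq_of_mem_iff {xs ys : List Int} (hne : xs ≠ [])
    (h : ∀ z, z ∈ xs ↔ z ∈ ys) :
    PySem.List.min? xs (fun t => t) = PySem.List.min? ys (fun t => t) := by
  have hne' : ys ≠ [] := by
    obtain ⟨a, ha⟩ := List.exists_mem_of_ne_nil xs hne
    intro hy
    exact absurd ((h a).mp ha) (by simp [hy])
  obtain ⟨m1, hm1⟩ := Option.ne_none_iff_exists'.mp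
    (show PySem.List.min? xs (fun t => t) ≠ none from
      fun hc => hne ((PySem.List.min?_eq_none_iff _ _).mp hc))
  obtain ⟨m2, hm2⟩ := Option.ne_none_iff_exists'.mp
    (show PySem.List.min? ys (fun t => t) ≠ none from
      fun hc => hne' ((PySem.List.min?_eq_none_iff _ _).mp hc))
  rw [hm1, hm2]
  have h1 := PySem.List.min?_mem hm1
  have h2 := PySem.List.min?_mem hm2
  have h12 := PySem.List.min?_isMin hm2 m1 ((h m1).mp h1)
  have h21 := PySem.List.min?_isMin hm1 m2 ((h m2).mpr h2)
  simp only at h12 h21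
  exact congrArg some (le_antisymm h21 h12)

theorem pRect_congr {c1 c2 : List (Int × Int)} (h1 : c1.Nodup) (h2 : c2.Nodup)
    (hne : c1 ≠ []) (hm : ∀ z, z ∈ c1 ↔ z ∈ c2) : pRect c1 = pRect c2 := by
  have hperm : c1.Perm c2 := (List.perm_ext_iff_of_nodup h1 h2).mpr hm
  have hlen : c1.length = c2.length := hperm.length_eq
  have hfst : ∀ z, z ∈ c1.map Prod.fst ↔ z ∈ c2.map Prod.fst := by
    intro z
    simp only [List.mem_map]
    constructor
    · rintro ⟨t, ht, rfl⟩; exact ⟨t, (hm t).mp ht, rfl⟩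
    · rintro ⟨t, ht, rfl⟩; exact ⟨t, (hm t).mpr ht, rfl⟩
  have hsnd : ∀ z, z ∈ c1.map Prod.snd ↔ z ∈ c2.map Prod.snd := by
    intro z
    simp only [List.mem_map]
    constructor
    · rintro ⟨t, ht, rfl⟩; exact ⟨t, (hm t).mp ht, rfl⟩
    · rintro ⟨t, ht, rfl⟩; exact ⟨t, (hm t).mpr ht, rfl⟩
  have hnf : c1.map Prod.fst ≠ [] := by
    intro hc; exact hne (List.map_eq_nil_iff.mp hc)
  have hns : c1.map Prod.snd ≠ [] := by
    intro hc; exact hne (List.map_eq_nil_iff.mp hc)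
  unfold pRect
  rw [max?_id_eq_of_mem_iff hnf hfst, min?_id_eq_of_mem_iff hnf hfst,
    max?_id_eq_of_mem_iff hns hsnd, min?_id_eq_of_mem_iff hns hsnd, hlen]

-- ---- the lockstep relation over the scan ----

structure RelState (g0 : List (List Int)) (n m : Int)
    (stA : PySem.Set (Int × Int) × List (List Int))
    (stB : PySem.Set (Int × Int) × List (List (Int × Int))) : Prop where
  m1 : ∀ z, z ∈ stA.1 ↔ z ∈ stB.1
  m2 : stA.2 = stB.2.foldl (fun h comp => if pRect comp then pMark h comp else h) g0
  m3 : ∀ z ∈ stB.1, pValid n m z ∧ pGet g0 z.1 z.2 ≠ 0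
  m4 : ∀ comp ∈ stB.2, comp.Nodup ∧ ∀ z ∈ comp, pValid n m z ∧ pGet g0 z.1 z.2 ≠ 0

theorem foldl_rel {α σA σB : Type} (R : σA → σB → Prop) (fA : σA → α → σA) (fB : σB → α → σB) :
    ∀ (l : List α) (sA : σA) (sB : σB), R sA sB →
    (∀ x ∈ l, ∀ tA tB, R tA tB → R (fA tA x) (fB tB x)) →
    R (l.foldl fA sA) (l.foldl fB sB) := by
  intro l
  induction l with
  | nil => intro sA sB h _; exact h
  | cons x l' ih =>
      intro sA sB h hstep
      exact ih _ _ (hstep x (List.mem_cons_self ..) sA sB h)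
        (fun y hy => hstep y (List.mem_cons_of_mem _ hy))

theorem markFold_facts {g0 : List (List Int)} {n m : Int}
    (hn : (g0.length : Int) = n) (hm : ∀ row ∈ g0, m ≤ (row.length : Int)) :
    ∀ (comps : List (List (Int × Int))) (h : List (List Int)),
    (h.map List.length = g0.map List.length) →
    (∀ i j : Int, 0 ≤ i → 0 ≤ j →
      pGet h i j = pGet g0 i j ∨ (pGet h i j = 3 ∧ pGet g0 i j ≠ 0)) →
    (∀ comp ∈ comps, ∀ z ∈ comp, pValid n m z ∧ pGet g0 z.1 z.2 ≠ 0) →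
    ((comps.foldl (fun h comp => if pRect comp then pMark h comp else h) h).map List.length =
        g0.map List.length ∧
     ∀ i j : Int, 0 ≤ i → 0 ≤ j →
       pGet (comps.foldl (fun h comp => if pRect comp then pMark h comp else h) h) i j =
         pGet g0 i j ∨
       (pGet (comps.foldl (fun h comp => if pRect comp then pMark h comp else h) h) i j = 3 ∧
         pGet g0 i j ≠ 0)) := by
  intro comps
  induction comps with
  | nil => intro h hmap hget _; exact ⟨hmap, hget⟩
  | cons comp comps' ih =>
      intro h hmap hget hcomp
      simp only [List.foldl_cons]
      have hcells : ∀ z ∈ comp, pValid n m z ∧ pGet g0 z.1 z.2 ≠ 0 :=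
        hcomp comp (List.mem_cons_self ..)
      have hco : ∀ t ∈ comp, 0 ≤ t.1 ∧ t.1.toNat < h.length ∧ 0 ≤ t.2 ∧
          t.2.toNat < (PySem.List.pyGetD h t.1 []).length := by
        intro t htc
        obtain ⟨hv1, hv2, hv3, hv4⟩ := (hcells t htc).1
        have hglen : (g0.length : Int) = n := hn
        have hlh : h.length = g0.length := by
          have := congrArg List.length hmap; simpa using this
        have h1 : t.1.toNat < g0.length := by omega
        refine ⟨hv1, by omega, hv3, ?_⟩
        rw [rowlen_of_mapLen hmap hv1 h1]
        have hmem : PySem.List.pyGetD g0 t.1 [] ∈ g0 := by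
          rw [pyGetD_eq_getElem' g0 [] hv1 h1]
          exact List.getElem_mem _
        have hml := hm _ hmem
        omega
      by_cases hrect : pRect comp
      · rw [if_pos hrect] at *
        obtain ⟨hrl, hgm⟩ := pMark_facts comp h hco
        apply ih
        · rw [hrl]; exact hmap
        · intro i j hi hj
          rw [hgm i j hi hj]
          by_cases hmem : (i, j) ∈ comp
          · rw [if_pos hmem]
            exact Or.inr ⟨rfl, (hcells _ hmem).2⟩
          · rw [if_neg hmem]; exact hget i j hi hj
        · exact fun c hc => hcomp c (List.mem_cons_of_mem _ hc)
      · rw [if_neg hrect] at *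
        exact ih h hmap hget (fun c hc => hcomp c (List.mem_cons_of_mem _ hc))

-- the per-cell lockstep step
theorem cell_step {g0 : List (List Int)} {n m : Int}
    (hn : (g0.length : Int) = n) (hm : ∀ row ∈ g0, m ≤ (row.length : Int))
    {i j : Int} (hi : 0 ≤ i) (hin : i < n) (hj : 0 ≤ j) (hjm : j < m)
    {stA : PySem.Set (Int × Int) × List (List Int)}
    {stB : PySem.Set (Int × Int) × List (List (Int × Int))}
    (hR : RelState g0 n m stA stB) :
    RelState g0 n m (pCell n m i stA j) (pbCell g0 n m i stB j) := by
  obtain ⟨hmap, hget⟩ := markFold_facts hn hm stB.2 g0 rfl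
    (fun i j _ _ => Or.inl rfl) (fun c hc => (hR.m4 c hc).2)
  rw [← hR.m2] at hmap hget
  have htr : ∀ d : Int × Int, pValid n m d →
      (pGet stA.2 d.1 d.2 ≠ 0 ↔ pGet g0 d.1 d.2 ≠ 0) := by
    intro d hd
    rcases hget d.1 d.2 hd.1 hd.2.2.1 with h | h
    · rw [h]
    · constructor
      · intro _; exact h.2
      · intro _; rw [h.1]; norm_num
  have hvalij : pValid n m (i, j) := ⟨hi, hin, hj, hjm⟩
  by_cases hguard : pGet g0 i j ≠ 0 ∧ (i, j) ∉ stB.1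
  · have hguardA : pGet stA.2 i j ≠ 0 ∧ (i, j) ∉ stA.1 := by
      refine ⟨(htr (i, j) hvalij).mpr hguard.1, fun hc => hguard.2 ((hR.m1 _).mp hc)⟩
    rw [pCell, if_pos hguardA, pbCell, if_pos hguard]
    -- run the DFS characterisation
    have hIdfs : DfsInv stA.2 n m stA.1 (i, j)
        (PySem.Set.add stA.1 (i, j)) [(i, j)] [(i, j)] := by
      refine ⟨?_, by simp, ?_, ?_, ?_, ?_, ?_, by simp, ?_⟩
      · intro z; rw [PySem.Set.mem_add]; simp only [List.mem_singleton]
      · intro z hz; rw [List.mem_singleton] at hz; subst hz; exact hguardA.2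
      · intro z hz; rw [List.mem_singleton] at hz; subst hz; exact hvalij
      · intro z hz; rw [List.mem_singleton] at hz; subst hz; exact hguardA.1
      · intro z hz; exact hz
      · intro z hz; rw [List.mem_singleton] at hz; subst hz; exact Relation.ReflTransGen.refl
      · intro z hz hzf; rw [List.mem_singleton] at hz; subst hz
        exact absurd (List.mem_singleton.mpr rfl) hzf
    have hfuel : 2 * (n.toNat * m.toNat - ([(i, j)] : List (Int × Int)).length) +
        ([(i, j)] : List (Int × Int)).length < 2 * (n.toNat * m.toNat) + 2 := by
      simp only [List.length_cons, List.length_nil]; omega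
    obtain ⟨hAv, hAnd, hAreach, hAprops⟩ := pDfs_spec _ _ _ _ hIdfs hfuel
    -- run the frontier-growth characterisation
    have hIgrow : GrowInv g0 n m stB.1 (i, j) [(i, j)] [(i, j)] := by
      refine ⟨by simp, ?_, ?_, ?_, ?_, ?_, by simp, ?_⟩
      · intro z hz; rw [List.mem_singleton] at hz; subst hz; exact hguard.2
      · intro z hz; rw [List.mem_singleton] at hz; subst hz; exact hvalij
      · intro z hz; rw [List.mem_singleton] at hz; subst hz; exact hguard.1
      · intro z hz; exact hz
      · intro z hz; rw [List.mem_singleton] at hz; subst hz; exact Relation.ReflTransGen.refl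
      · intro z hz hzf; rw [List.mem_singleton] at hz; subst hz
        exact absurd (List.mem_singleton.mpr rfl) hzf
    have hfuelB : n.toNat * m.toNat + 2 ≤
        (n.toNat * m.toNat + 2) + ([(i, j)] : List (Int × Int)).length := by
      simp only [List.length_cons, List.length_nil]; omega
    obtain ⟨hBnd, hBreach, hBprops⟩ :=
      pbGrow_spec (n.toNat * m.toNat + 2) [(i, j)] [(i, j)] hIgrow hfuelB
    set cA := (pDfs stA.2 n m (2 * (n.toNat * m.toNat) + 2)
        (PySem.Set.add stA.1 (i, j), [(i, j)], [(i, j)])).2 with hcA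
    set comp := pbGrow g0 n m stB.1 (n.toNat * m.toNat + 2) ([(i, j)], [(i, j)]) with hcomp
    -- member sets agree
    have hsame : ∀ z, z ∈ cA ↔ z ∈ comp := by
      intro z
      rw [hAreach z, hBreach z]
      exact pReach_congr htr hR.m1
    have hsA : (i, j) ∈ cA := (hAreach _).mpr Relation.ReflTransGen.refl
    have hAne : cA ≠ [] := fun hc => by simp [hc] at hsA
    have hrect : pRect cA = pRect comp := pRect_congr hAnd hBnd hAne hsame
    have hcompcells : ∀ z ∈ comp, pValid n m z ∧ pGet g0 z.1 z.2 ≠ 0 :=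
      fun z hz => ⟨(hBprops z hz).1, (hBprops z hz).2.1⟩
    -- the two markings give the same grid
    have hmarkeq : pMark stA.2 cA = pMark stA.2 comp := by
      have hcoA : ∀ t ∈ cA, 0 ≤ t.1 ∧ t.1.toNat < stA.2.length ∧ 0 ≤ t.2 ∧
          t.2.toNat < (PySem.List.pyGetD stA.2 t.1 []).length := by
        intro t ht
        obtain ⟨hv1, hv2, hv3, hv4⟩ := (hAprops t ht).1
        have hglen : (g0.length : Int) = n := hn
        have hlh : stA.2.length = g0.length := by
          have := congrArg List.length hmap; simpa using this
        have h1 : t.1.toNat < g0.length := by omega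
        refine ⟨hv1, by omega, hv3, ?_⟩
        rw [rowlen_of_mapLen hmap hv1 h1]
        have hmemr : PySem.List.pyGetD g0 t.1 [] ∈ g0 := by
          rw [pyGetD_eq_getElem' g0 [] hv1 h1]
          exact List.getElem_mem _
        have hml := hm _ hmemr
        omega
      have hcoB : ∀ t ∈ comp, 0 ≤ t.1 ∧ t.1.toNat < stA.2.length ∧ 0 ≤ t.2 ∧
          t.2.toNat < (PySem.List.pyGetD stA.2 t.1 []).length := by
        intro t ht
        exact hcoA t ((hsame t).mpr ht)
      obtain ⟨hrlA, hgA⟩ := pMark_facts cA stA.2 hcoA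
      obtain ⟨hrlB, hgB⟩ := pMark_facts comp stA.2 hcoB
      apply grid_ext (by rw [hrlA, hrlB])
      intro a b ha hb
      rw [hgA a b ha hb, hgB a b ha hb]
      by_cases hmemc : (a, b) ∈ cA
      · rw [if_pos hmemc, if_pos ((hsame _).mp hmemc)]
      · rw [if_neg hmemc, if_neg (fun hc => hmemc ((hsame _).mpr hc))]
    refine ⟨?_, ?_, ?_, ?_⟩
    · intro z
      simp only []
      rw [hAv z, PySem.Set.mem_update, hR.m1 z, hsame z]
    · simp only [List.foldl_append, List.foldl_cons, List.foldl_nil]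
      rw [← hR.m2, ← hrect]
      by_cases hrc : pRect cA
      · rw [if_pos hrc, if_pos hrc, hmarkeq]
      · rw [if_neg hrc, if_neg hrc]
    · intro z hz
      rw [PySem.Set.mem_update] at hz
      rcases hz with h | h
      · exact hR.m3 z h
      · exact hcompcells z h
    · intro c hc
      rcases List.mem_append.mp hc with h | h
      · exact hR.m4 c h
      · rw [List.mem_singleton] at h
        subst h
        exact ⟨hBnd, hcompcells⟩
  · have hguardA : ¬(pGet stA.2 i j ≠ 0 ∧ (i, j) ∉ stA.1) := by
      intro hc
      exact hguard ⟨(htr (i, j) hvalij).mp hc.1, fun hb => hc.2 ((hR.m1 _).mpr hb)⟩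
    rw [pCell, if_neg hguardA, pbCell, if_neg hguard]
    exact hR

theorem headD_eq_pyGetD {g : List (List Int)} (hne : g ≠ []) :
    PySem.List.pyGetD g 0 [] = g.headD [] := by
  cases g with
  | nil => exact absurd rfl hne
  | cons r rs => rw [PySem.List.pyGetD_zero_cons]; rfl

-- ===== VERDICT (by name: the statement is the Claim_ definition above) =====
theorem p_spec : Claim_equal_p := by
  unfold Claim_equal_p Spec_p
  intro g _ hpre
  obtain ⟨hne, hrows⟩ := hpre
  simp only [p, p_alt, pbComps]
  set n : Int := (g.length : Int) with hn
  set m : Int := ((PySem.List.pyGetD g 0 []).length : Int) with hmdef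
  have hm : ∀ row ∈ g, m ≤ (row.length : Int) := by
    intro row hrow
    rw [hmdef, headD_eq_pyGetD hne]
    exact_mod_cast hrows row hrow
  have hfinal : RelState g n m
      ((PySem.List.pyRange 0 n 1).foldl
        (fun st i => (PySem.List.pyRange 0 m 1).foldl (pCell n m i) st)
        ((PySem.Set.empty : PySem.Set (Int × Int)), g))
      ((PySem.List.pyRange 0 n 1).foldl
        (fun st i => (PySem.List.pyRange 0 m 1).foldl (pbCell g n m i) st)
        ((PySem.Set.empty : PySem.Set (Int × Int)), [])) := by
    apply foldl_rel (RelState g n m)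
    · refine ⟨?_, rfl, ?_, ?_⟩
      · intro z; simp [PySem.Set.empty]
      · intro z hz; simp [PySem.Set.empty] at hz
      · intro c hc; simp at hc
    · intro i hi tA tB hR
      have hib := PySem.List.mem_pyRange_one.mp hi
      apply foldl_rel (RelState g n m)
      · exact hR
      · intro j hj uA uB hR'
        have hjb := PySem.List.mem_pyRange_one.mp hj
        exact cell_step hn.symm hm hib.1 hib.2 hjb.1 hjb.2 hR'
  exact hfinal.m2
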